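-- pv_equiv track=rewrite | github.com/billpquach/pinlist-music-recommender | flask_server/pinclip.py | deduplicate_by_artist
-- ===== SOURCE A (Python) =====
-- def deduplicate_by_artist(scored: list[tuple], max_per_artist: int = 2) -> list[tuple]:
--     artist_count: dict[str, int] = {}
--     result = []
--     for entry in scored:
--         artist = entry[2]
--         if artist_count.get(artist, 0) < max_per_artist:
--             result.append(entry)
--             artist_count[artist] = artist_count.get(artist, 0) + 1
--     return result
-- ===== SOURCE B (Python) =====
-- def deduplicate_by_artist(scored: list[tuple], max_per_artist: int = 2) -> list[tuple]:
--     # Keep entry i iff fewer than max_per_artist earlier entries share its artist: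
--     # no running counter; the prior count is recomputed from the prefix each time.
--     return [e for i, e in enumerate(scored)
--             if sum(1 for p in scored[:i] if p[2] == e[2]) < max_per_artist]
-- ===== Notes on version B (the rewrite author's own statement) =====
-- stated objective: alternative
-- what changed: Replaces the stateful dict-counter loop by a stateless filter that keeps entry i iff the recomputed count of same-artist entries in scored[:i] is below the cap.
import Mathlib
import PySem

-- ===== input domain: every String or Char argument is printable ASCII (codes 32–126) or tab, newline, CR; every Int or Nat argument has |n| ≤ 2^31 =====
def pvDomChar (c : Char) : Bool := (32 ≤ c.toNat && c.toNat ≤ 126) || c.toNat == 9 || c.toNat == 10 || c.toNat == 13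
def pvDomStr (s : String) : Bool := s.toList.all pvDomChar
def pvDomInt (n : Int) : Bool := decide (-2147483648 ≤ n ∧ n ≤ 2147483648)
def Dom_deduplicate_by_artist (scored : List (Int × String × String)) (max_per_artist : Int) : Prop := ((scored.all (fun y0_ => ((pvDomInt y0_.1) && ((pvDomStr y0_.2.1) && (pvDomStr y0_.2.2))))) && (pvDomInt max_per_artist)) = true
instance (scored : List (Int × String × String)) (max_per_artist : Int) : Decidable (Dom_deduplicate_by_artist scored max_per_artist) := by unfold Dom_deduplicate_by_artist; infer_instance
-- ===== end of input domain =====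

-- B replaces A's stateful dict-counter loop by a stateless filter that recomputes each
-- entry's prior same-artist count from the prefix (alternative decomposition, not faster).

-- ===== PORT A =====
def deduplicate_by_artist (scored : List (Int × String × String)) (max_per_artist : Int) : List (Int × String × String) :=
  (scored.foldl
    (fun (st : PySem.Dict String Int × List (Int × String × String)) entry =>
      let artist := entry.2.2
      if st.1.getD artist 0 < max_per_artist then
        (st.1.insert artist (st.1.getD artist 0 + 1), st.2 ++ [entry])
      else st)
    ((PySem.Dict.empty : PySem.Dict String Int), ([] : List (Int × String × String)))).2

-- ===== PORT B =====
-- scored[:i] with i ≥ 0 (from enumerate) is exactly List.take i; sum(1 for … if …) is countP.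
def deduplicate_by_artist_alt (scored : List (Int × String × String)) (max_per_artist : Int) : List (Int × String × String) :=
  ((PySem.List.enumerate scored).filter
      (fun p => (((scored.take p.1.toNat).countP (fun q => q.2.2 == p.2.2.2) : Int) < max_per_artist)))
    |>.map (·.2)

-- ===== PRECONDITION & SPEC =====
def Spec_deduplicate_by_artist (scored : List (Int × String × String)) (max_per_artist : Int) (out : List (Int × String × String)) : Prop := out = deduplicate_by_artist_alt scored max_per_artist
instance (scored : List (Int × String × String)) (max_per_artist : Int) (out : List (Int × String × String)) : Decidable (Spec_deduplicate_by_artist scored max_per_artist out) := by unfold Spec_deduplicate_by_artist; infer_instance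

-- ===== CLAIM (what is proved, stated in full; the proofs are below) =====
def Claim_equal_deduplicate_by_artist : Prop := ∀ (scored : List (Int × String × String)) (max_per_artist : Int), Dom_deduplicate_by_artist scored max_per_artist → Spec_deduplicate_by_artist scored max_per_artist (deduplicate_by_artist scored max_per_artist)

-- ===== LEMMAS AND PROOFS =====

-- Common reference: keep an entry iff fewer than m among ALL previously seen entries share its artist.
def pvKeep (m : Int) (seen : List (Int × String × String)) : List (Int × String × String) → List (Int × String × String)
  | [] => []
  | e :: rest =>
      if ((seen.countP (fun q => q.2.2 == e.2.2) : Int) < m) then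
        e :: pvKeep m (seen ++ [e]) rest
      else pvKeep m (seen ++ [e]) rest

lemma pv_cnt_append (seen : List (Int × String × String)) (e : Int × String × String) (a : String) :
    ((seen ++ [e]).countP (fun q => q.2.2 == a) : Nat)
      = seen.countP (fun q => q.2.2 == a) + (if e.2.2 = a then 1 else 0) := by
  simp [List.countP_append, List.countP_cons]

lemma pvA_loop (m : Int) :
    ∀ (rest seen : List (Int × String × String)) (d : PySem.Dict String Int)
      (acc : List (Int × String × String)),
      (∀ a : String, d.getD a 0 = min ((seen.countP (fun q => q.2.2 == a) : Nat) : Int) (max 0 m)) →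
      (rest.foldl
        (fun (st : PySem.Dict String Int × List (Int × String × String)) entry =>
          let artist := entry.2.2
          if st.1.getD artist 0 < m then
            (st.1.insert artist (st.1.getD artist 0 + 1), st.2 ++ [entry])
          else st)
        (d, acc)).2 = acc ++ pvKeep m seen rest := by
  intro rest
  induction rest with
  | nil => intro seen d acc _; simp [pvKeep]
  | cons e rest ih =>
      intro seen d acc hinv
      have hd := hinv e.2.2
      have hc0 : (0 : Int) ≤ ((seen.countP (fun q => q.2.2 == e.2.2) : Nat) : Int) := by positivity
      by_cases h : d.getD e.2.2 0 < m
      · have hk : ((seen.countP (fun q => q.2.2 == e.2.2) : Nat) : Int) < m := by omega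
        simp only [List.foldl_cons, if_pos h, pvKeep, hk, if_pos]
        rw [ih (seen ++ [e])]
        · simp
        · intro a
          rw [PySem.Dict.getD_insert, pv_cnt_append]
          have hda := hinv a
          by_cases he : a = e.2.2
          · subst he; simp; omega
          · have : ¬ (e.2.2 = a) := fun hh => he hh.symm
            simp [he, this, hda]
      · have hk : ¬ ((seen.countP (fun q => q.2.2 == e.2.2) : Nat) : Int) < m := by omega
        simp only [List.foldl_cons, if_neg h, pvKeep, hk, if_false]
        rw [ih (seen ++ [e])]
        intro a
        rw [pv_cnt_append]
        have hda := hinv a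
        by_cases he : e.2.2 = a
        · subst he; simp; omega
        · simp [he, hda]

lemma pvB_suffix (scored : List (Int × String × String)) (m : Int) :
    ∀ (rest : List (Int × String × String)) (k : Nat),
      rest = scored.drop k →
      (((PySem.List.enumerate rest (k : Int)).filter
          (fun p => (((scored.take p.1.toNat).countP (fun q => q.2.2 == p.2.2.2) : Int) < m)))
        |>.map (·.2)) = pvKeep m (scored.take k) rest := by
  intro rest
  induction rest with
  | nil => intro k _; simp [PySem.List.enumerate, pvKeep]
  | cons e rest ih =>
      intro k hk
      have hget : scored[k]? = some e := by
        have := congrArg (fun l => l.head?) hk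
        simpa [List.head?_drop] using this.symm
      have hdrop : rest = scored.drop (k + 1) := by
        have := congrArg (fun l => l.tail) hk
        simpa [List.tail_drop] using this
      have htake : scored.take (k + 1) = scored.take k ++ [e] := by
        rw [List.take_add_one, hget]; rfl
      rw [PySem.List.enumerate_cons]
      simp only [List.filter_cons]
      have hToNat : ((k : Int)).toNat = k := Int.toNat_natCast k
      have hcast : ((k : Int) + 1) = ((k + 1 : Nat) : Int) := by push_cast; ring
      by_cases h : ((scored.take k).countP (fun q => q.2.2 == e.2.2) : Int) < m
      · simp only [hToNat, h, decide_true, if_true, List.map_cons, pvKeep]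
        rw [hcast, ih (k+1) hdrop, htake]
      · simp only [hToNat, h, decide_false, Bool.false_eq_true, if_false, pvKeep]
        rw [hcast, ih (k+1) hdrop, htake]

-- ===== VERDICT (by name: the statement is the Claim_ definition above) =====
theorem deduplicate_by_artist_spec : Claim_equal_deduplicate_by_artist := by
  intro scored m _
  unfold Spec_deduplicate_by_artist deduplicate_by_artist deduplicate_by_artist_alt
  have hB := pvB_suffix scored m scored 0 (by simp)
  simp only [Nat.cast_zero] at hB
  rw [hB]
  rw [pvA_loop m scored [] PySem.Dict.empty []]
  · simp
  · intro a; simp [PySem.Dict.getD_empty]
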